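-- pv_equiv track=rewrite | github.com/eKMap/ekmap-publisher-for-qgis | ekmap_core/qgs_symbology_parser/categories_symbol_parser.py | __getDetailOtherValues
-- ===== SOURCE A (Python) =====
-- def __getDetailOtherValues(dump):
--     categoryDumps = dump.split('\n')
--     otherValues = []
--     for categoryDump in categoryDumps:
--         lineSplit = categoryDump.split('::')
--         if len(lineSplit) > 1 and lineSplit[0] != '':
--             otherValues.append(lineSplit[0])
--     return otherValues
-- ===== SOURCE B (Python) =====
-- def __getDetailOtherValues(dump):
--     # One-pass character scan with a small state machine instead of split('\n') + split('::') per line.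
--     out = []
--     buf = []          # characters of the current line seen before any '::'
--     found = False     # whether '::' was already seen on the current line
--     i = 0
--     n = len(dump)
--     while i < n:
--         c = dump[i]
--         if c == '\n':
--             buf = []
--             found = False
--             i += 1
--         elif found:
--             i += 1
--         elif c == ':' and i + 1 < n and dump[i + 1] == ':':
--             if buf:
--                 out.append(''.join(buf))
--             found = True
--             i += 2
--         else:
--             buf.append(c)
--             i += 1
--     return out
-- ===== Notes on version B (the rewrite author's own statement) =====
-- stated objective: alternative
-- what changed: Replaced the newline-split loop with a nested double-colon split per line by a single one-pass character state machine over the whole dump that collects each line's non-empty prefix before the first double-colon separator.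
import Mathlib
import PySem

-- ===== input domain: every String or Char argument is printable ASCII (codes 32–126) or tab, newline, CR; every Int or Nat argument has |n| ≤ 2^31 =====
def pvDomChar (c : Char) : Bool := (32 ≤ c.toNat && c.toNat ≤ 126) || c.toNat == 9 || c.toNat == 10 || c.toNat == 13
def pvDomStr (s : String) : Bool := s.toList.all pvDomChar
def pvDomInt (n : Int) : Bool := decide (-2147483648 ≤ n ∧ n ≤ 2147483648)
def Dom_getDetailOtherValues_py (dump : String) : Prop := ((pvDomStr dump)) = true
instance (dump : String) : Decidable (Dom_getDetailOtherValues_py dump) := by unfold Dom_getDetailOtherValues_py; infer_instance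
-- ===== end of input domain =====

-- B replaces the newline-split plus per-line double-colon-split loop by a single one-pass
-- character state machine over the whole dump (objective: alternative — different algorithm, same cost).


-- ===== PORT A =====
def getDetailOtherValues_py (dump : String) : List String :=
  let categoryDumps := PySem.Chars.splitOn dump.toList ['\n']
  categoryDumps.foldl
    (fun otherValues categoryDump =>
      let lineSplit := PySem.Chars.splitOn categoryDump [':', ':']
      if 1 < lineSplit.length ∧ lineSplit.headD [] ≠ [] then
        otherValues ++ [String.ofList (lineSplit.headD [])]
      else otherValues) []

-- ===== PORT B =====
-- one-pass scan: buf = chars of the current line before any '::', found = '::' already seen on this line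
def pvScan (cs : List Char) (buf : List Char) (found : Bool) (acc : List String) : List String :=
  match cs with
  | [] => acc
  | c :: rest =>
    if c = '\n' then pvScan rest [] false acc
    else if found then pvScan rest buf true acc
    else if c = ':' ∧ rest.head? = some ':' then
      pvScan rest.tail buf true (if buf = [] then acc else acc ++ [String.ofList buf])
    else pvScan rest (buf ++ [c]) false acc
termination_by cs.length
decreasing_by
  all_goals first
    | (simp [List.length_tail]; omega)
    | simp

def getDetailOtherValues_py_alt (dump : String) : List String :=
  pvScan dump.toList [] false []

-- ===== PRECONDITION & SPEC =====
def Spec_getDetailOtherValues_py (dump : String) (out : List String) : Prop := out = getDetailOtherValues_py_alt dump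
instance (dump : String) (out : List String) : Decidable (Spec_getDetailOtherValues_py dump out) := by unfold Spec_getDetailOtherValues_py; infer_instance

-- ===== CLAIM (what is proved, stated in full; the proofs are below) =====
def Claim_equal_getDetailOtherValues_py : Prop := ∀ (dump : String), Dom_getDetailOtherValues_py dump → Spec_getDetailOtherValues_py dump (getDetailOtherValues_py dump)

-- ===== LEMMAS AND PROOFS =====

-- structural characterisation of PySem.Chars.splitOn (for nonempty sep)
def mySplit (sep : List Char) : List Char → List (List Char)
  | [] => [[]]
  | c :: rest =>
    if sep.isPrefixOf (c :: rest) ∧ sep ≠ [] then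
      [] :: mySplit sep (List.drop sep.length (c :: rest))
    else (mySplit sep rest).modifyHead (c :: ·)
termination_by l => l.length
decreasing_by
  · rename_i h
    have : sep.length ≠ 0 := by simpa using h.2
    simp; omega
  · simp

theorem mySplit_cons (sep : List Char) (c : Char) (rest : List Char) :
    mySplit sep (c :: rest)
      = if sep.isPrefixOf (c :: rest) ∧ sep ≠ [] then
          [] :: mySplit sep (List.drop sep.length (c :: rest))
        else (mySplit sep rest).modifyHead (c :: ·) := by
  rw [mySplit]

theorem pvScan_cons (c : Char) (rest buf : List Char) (found : Bool) (acc : List String) :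
    pvScan (c :: rest) buf found acc
      = if c = '\n' then pvScan rest [] false acc
        else if found then pvScan rest buf true acc
        else if c = ':' ∧ rest.head? = some ':' then
          pvScan rest.tail buf true (if buf = [] then acc else acc ++ [String.ofList buf])
        else pvScan rest (buf ++ [c]) false acc := by
  rw [pvScan]

theorem modifyHead_id' {α : Type} (l : List α) : l.modifyHead (fun x => x) = l := by
  cases l <;> simp

theorem mySplit_ne_nil (sep l : List Char) : mySplit sep l ≠ [] := by
  induction l using mySplit.induct sep with
  | case1 => simp [mySplit]
  | case2 c rest h ih => simp [mySplit, h]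
  | case3 c rest h ih =>
    rw [mySplit_cons, if_neg h]
    cases hms : mySplit sep rest with
    | nil => exact absurd hms ih
    | cons a t => simp

theorem go_spec (sep : List Char) (hsep : sep ≠ []) :
    ∀ fuel l cur acc, l.length < fuel →
      PySem.Chars.splitOn.go sep fuel l cur acc
        = acc.reverse ++ (mySplit sep l).modifyHead (cur.reverse ++ ·) := by
  intro fuel
  induction fuel with
  | zero => intro l cur acc h; omega
  | succ n ih =>
    intro l cur acc h
    cases l with
    | nil =>
      simp [PySem.Chars.splitOn.go, mySplit]
    | cons c rest =>
      by_cases hp : sep.isPrefixOf (c :: rest)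
      · have hlen : sep.length ≤ (c :: rest).length := (List.isPrefixOf_iff_prefix.mp hp).length_le
        have hslen : 1 ≤ sep.length := by
          cases sep with | nil => exact absurd rfl hsep | cons _ _ => simp
        rw [PySem.Chars.splitOn.go]
        simp only [hp, if_true]
        rw [ih _ _ _ (by simp at h ⊢; omega)]
        rw [mySplit_cons, if_pos ⟨hp, hsep⟩]
        simp [modifyHead_id']
      · rw [PySem.Chars.splitOn.go]
        simp only [hp, if_false, Bool.false_eq_true]
        rw [ih _ _ _ (by simp at h ⊢; omega)]
        rw [mySplit_cons, if_neg (by simp [hp])]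
        cases hms : mySplit sep rest with
        | nil => exact absurd hms (mySplit_ne_nil sep rest)
        | cons a t => simp

theorem splitOn_eq_mySplit (sep l : List Char) (hsep : sep ≠ []) :
    PySem.Chars.splitOn l sep = mySplit sep l := by
  have h := go_spec sep hsep (l.length + 1) l [] [] (by omega)
  unfold PySem.Chars.splitOn
  rw [h]
  cases mySplit sep l <;> simp

-- if sep never occurs, splitting is the identity
theorem mySplit_no_occ (sep l : List Char) (hsep : sep ≠ []) (h : ¬ sep <:+: l) :
    mySplit sep l = [l] := by
  induction l with
  | nil =>
    simp [mySplit]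
  | cons c rest ih =>
    have hp : ¬ sep.isPrefixOf (c :: rest) := by
      intro hpp
      exact h ((List.isPrefixOf_iff_prefix.mp hpp).isInfix)
    rw [mySplit_cons, if_neg (by simp [hp])]
    rw [ih (fun hinf => h (hinf.trans (List.suffix_cons c rest).isInfix))]
    simp

-- per-line output of A
def lineOutA (l : List Char) : List String :=
  let p := mySplit [':', ':'] l
  if 1 < p.length ∧ p.headD [] ≠ [] then [String.ofList (p.headD [])] else []

def outLines (ls : List (List Char)) : List String := ls.flatMap lineOutA

theorem foldA (ls : List (List Char)) (acc : List String) :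
    ls.foldl
      (fun otherValues categoryDump =>
        let lineSplit := mySplit [':', ':'] categoryDump
        if 1 < lineSplit.length ∧ lineSplit.headD [] ≠ [] then
          otherValues ++ [String.ofList (lineSplit.headD [])]
        else otherValues) acc = acc ++ outLines ls := by
  induction ls generalizing acc with
  | nil => simp [outLines]
  | cons l t ih =>
    have hstep : (let lineSplit := mySplit [':', ':'] l;
        if 1 < lineSplit.length ∧ lineSplit.headD [] ≠ [] then
          acc ++ [String.ofList (lineSplit.headD [])]
        else acc) = acc ++ lineOutA l := by
      simp only [lineOutA]
      split_ifs <;> simp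
    rw [List.foldl_cons]
    simp only at hstep ⊢
    rw [hstep, ih]
    simp [outLines]

-- splitting on newline, one line at a time
theorem mySplit_nl (cs : List Char) :
    mySplit ['\n'] cs
      = cs.takeWhile (· ≠ '\n')
          :: (if '\n' ∈ cs then mySplit ['\n'] ((cs.dropWhile (· ≠ '\n')).tail) else []) := by
  induction cs with
  | nil => simp [mySplit]
  | cons c rest ih =>
    by_cases hc : c = '\n'
    · subst hc
      rw [mySplit_cons, if_pos (by simp [List.isPrefixOf])]
      simp [List.takeWhile_cons, List.dropWhile_cons]
    · have hc' : ¬ ('\n' : Char) = c := fun h => hc h.symm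
      rw [mySplit_cons, if_neg (by simp [List.isPrefixOf, hc'])]
      rw [ih]
      simp [List.takeWhile_cons, List.dropWhile_cons, hc, hc']

-- the first '::' of buf ++ "::" ++ t sits at the boundary when buf ++ ":" has no "::"
theorem mySplit_colons (buf t : List Char) (h : ¬ [':', ':'] <:+: (buf ++ [':'])) :
    mySplit [':', ':'] (buf ++ ':' :: ':' :: t) = buf :: mySplit [':', ':'] t := by
  induction buf with
  | nil =>
    rw [List.nil_append, mySplit_cons, if_pos (by simp [List.isPrefixOf])]
    simp
  | cons b buf ih =>
    have hp : ¬ ([':', ':'] : List Char).isPrefixOf (b :: buf ++ ':' :: ':' :: t) := by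
      intro hpp
      rw [List.isPrefixOf_iff_prefix] at hpp
      have hb : b = ':' := by
        have := List.IsPrefix.getElem hpp (i := 0) (by simp)
        simpa using this.symm
      cases buf with
      | nil =>
        exact h ⟨[], [], by simp [hb]⟩
      | cons b2 buf2 =>
        have hb2 : b2 = ':' := by
          have h2 := List.IsPrefix.getElem hpp (i := 1) (by simp)
          simpa using h2.symm
        exact h ⟨[], buf2 ++ [':'], by simp [hb, hb2]⟩
    have hstep : ¬ [':', ':'] <:+: (buf ++ [':']) :=
      fun hinf => h (hinf.trans (List.suffix_cons b (buf ++ [':'])).isInfix)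
    rw [List.cons_append, mySplit_cons, if_neg (fun hand => hp hand.1)]
    rw [ih hstep]
    simp

-- a length-2 infix of zs ++ [b] is an infix of zs or straddles the end
theorem infix_pair_append (x y b : Char) (zs : List Char)
    (h : [x, y] <:+: (zs ++ [b])) :
    [x, y] <:+: zs ∨ (zs.getLast? = some x ∧ b = y) := by
  induction zs with
  | nil =>
    exfalso
    have := h.length_le
    simp at this
  | cons a t ih =>
    rw [List.cons_append, List.infix_cons_iff] at h
    cases h with
    | inl hpre =>
      have ha : x = a := by
        have := List.IsPrefix.getElem hpre (i := 0) (by simp)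
        simpa using this
      cases t with
      | nil =>
        right
        have hy : y = b := by
          have := List.IsPrefix.getElem hpre (i := 1) (by simp)
          simpa using this
        exact ⟨by simp [ha], hy.symm⟩
      | cons t0 ts =>
        left
        have hy : y = t0 := by
          have := List.IsPrefix.getElem hpre (i := 1) (by simp)
          simpa using this
        subst ha hy
        exact (List.take_prefix 2 (x :: y :: ts)).isInfix
    | inr hinf =>
      cases ih hinf with
      | inl h1 => exact Or.inl (h1.trans (List.suffix_cons a t).isInfix)
      | inr h2 =>
        right
        have ht : t ≠ [] := by
          intro he; rw [he] at h2; simp at h2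
        constructor
        · rw [show (a :: t).getLast? = t.getLast? by
            cases t with
            | nil => exact absurd rfl ht
            | cons u us => simp [List.getLast?_cons]]
          exact h2.1
        · exact h2.2

def OkBuf (buf cs : List Char) : Prop := ¬ [':', ':'] <:+: (buf ++ cs.take 1)

-- main invariant of the scan
theorem pvScan_spec : ∀ n cs buf acc found, cs.length ≤ n →
    (found = false → OkBuf buf cs) →
    pvScan cs buf found acc
      = acc ++ (if found then [] else lineOutA (buf ++ cs.takeWhile (· ≠ '\n')))
            ++ (if '\n' ∈ cs then outLines (mySplit ['\n'] ((cs.dropWhile (· ≠ '\n')).tail)) else []) := by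
  intro n
  induction n with
  | zero =>
    intro cs buf acc found h hok
    have : cs = [] := List.length_eq_zero_iff.mp (by omega)
    subst this
    cases found with
    | false =>
      have hnoc : ¬ [':', ':'] <:+: buf := by simpa [OkBuf] using hok rfl
      simp [pvScan, lineOutA, mySplit_no_occ _ _ (by simp) hnoc]
    | true => simp [pvScan]
  | succ n ih =>
    intro cs buf acc found h hok
    cases cs with
    | nil =>
      cases found with
      | false =>
        have hnoc : ¬ [':', ':'] <:+: buf := by simpa [OkBuf] using hok rfl
        simp [pvScan, lineOutA, mySplit_no_occ _ _ (by simp) hnoc]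
      | true => simp [pvScan]
    | cons c rest =>
      by_cases hc : c = '\n'
      · subst hc
        rw [pvScan_cons, if_pos rfl]
        rw [ih rest [] acc false (by simp at h ⊢; omega) (by
          intro _
          unfold OkBuf
          intro hinf
          have := hinf.length_le
          simp at this)]
        have e1 : List.takeWhile (fun x => decide (x ≠ '\n')) ('\n' :: rest) = [] := by
          simp [List.takeWhile_cons]
        have e2 : List.dropWhile (fun x => decide (x ≠ '\n')) ('\n' :: rest) = '\n' :: rest := by
          simp [List.dropWhile_cons]
        rw [e1, e2, List.tail_cons, if_pos List.mem_cons_self, mySplit_nl rest]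
        have hX : (if found = true then [] else lineOutA (buf ++ [])) = ([] : List String) := by
          cases found with
          | true => simp
          | false =>
            have hnoc : ¬ [':', ':'] <:+: buf := by
              have h0 := hok rfl
              unfold OkBuf at h0
              intro hinf
              exact h0 (hinf.trans (List.prefix_append buf _).isInfix)
            simp [lineOutA, mySplit_no_occ _ _ (by simp) hnoc]
        rw [hX]
        simp only [outLines, List.flatMap_cons]
        by_cases hnr : '\n' ∈ rest <;>
          simp [hnr, outLines, List.append_assoc]
      · rw [pvScan_cons, if_neg hc]
        cases found with
        | true =>
          simp only [if_true]
          rw [ih rest buf acc true (by simp at h ⊢; omega) (by simp)]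
          have hmem : ('\n' ∈ c :: rest) ↔ ('\n' ∈ rest) := by
            simp [List.mem_cons]
            intro hh
            exact absurd hh.symm hc
          by_cases hnr : '\n' ∈ rest <;>
            simp [hnr, hmem, List.dropWhile_cons, hc]
        | false =>
          simp only [Bool.false_eq_true, if_false]
          by_cases hcol : c = ':' ∧ rest.head? = some ':'
          · rw [if_pos hcol]
            obtain ⟨hc1, hc2⟩ := hcol
            obtain ⟨rest2, hrest⟩ : ∃ rest2, rest = ':' :: rest2 := by
              cases rest with
              | nil => simp at hc2
              | cons r rs => simp at hc2; exact ⟨rs, by rw [hc2]⟩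
            subst hrest
            subst hc1
            have hokb : ¬ [':', ':'] <:+: (buf ++ [':']) := by
              simpa [OkBuf] using hok rfl
            rw [ih (':' :: rest2).tail buf _ true
                (by simp at h ⊢; omega) (by simp)]
            simp only [List.tail_cons, if_true]
            have htw : ((':' :: ':' :: rest2).takeWhile (· ≠ '\n')) = ':' :: ':' :: rest2.takeWhile (· ≠ '\n') := by
              simp [List.takeWhile_cons]
            have hdw : ((':' :: ':' :: rest2).dropWhile (· ≠ '\n')) = rest2.dropWhile (· ≠ '\n') := by
              simp [List.dropWhile_cons]
            rw [htw, hdw]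
            have hline : lineOutA (buf ++ ':' :: ':' :: rest2.takeWhile (· ≠ '\n')) =
                (if buf = [] then [] else [String.ofList buf]) := by
              unfold lineOutA
              rw [mySplit_colons buf _ hokb]
              have hnn := mySplit_ne_nil [':', ':'] (rest2.takeWhile (· ≠ '\n'))
              by_cases hbe : buf = []
              · simp [hbe]
              · simp only [if_neg hbe, List.headD_cons]
                rw [if_pos]
                constructor
                · simp only [List.length_cons]
                  cases hms : mySplit [':', ':'] (rest2.takeWhile (· ≠ '\n')) with
                  | nil => exact absurd hms hnn
                  | cons _ _ => simp
                · exact hbe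
            rw [hline]
            have hmem2 : ('\n' ∈ (':' :: ':' :: rest2)) ↔ ('\n' ∈ rest2) := by simp
            by_cases hnr : '\n' ∈ rest2 <;>
              by_cases hbe : buf = [] <;>
              simp [hnr, hbe, hmem2, List.append_assoc]
          · rw [if_neg hcol]
            have hok' : OkBuf (buf ++ [c]) rest := by
              unfold OkBuf
              cases rest with
              | nil =>
                simp only [List.take_nil, List.append_nil]
                have h0 := hok rfl
                unfold OkBuf at h0
                simpa using h0
              | cons r rs =>
                simp only [List.take_succ_cons, List.take_zero]
                intro hinf
                rw [List.append_assoc] at hinf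
                rcases infix_pair_append ':' ':' r (buf ++ [c]) (by simpa using hinf) with h1 | h2
                · have h0 := hok rfl
                  unfold OkBuf at h0
                  exact h0 (by simpa using h1)
                · have hcc : c = ':' := by
                    have := h2.1
                    simpa [List.getLast?_concat] using this
                  exact hcol ⟨hcc, by simp [h2.2]⟩
            rw [ih rest (buf ++ [c]) acc false (by simp at h ⊢; omega) (fun _ => hok')]
            have htw : ((c :: rest).takeWhile (· ≠ '\n')) = c :: rest.takeWhile (· ≠ '\n') := by
              simp [List.takeWhile_cons, hc]
            have hdw : ((c :: rest).dropWhile (· ≠ '\n')) = rest.dropWhile (· ≠ '\n') := by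
              simp [List.dropWhile_cons, hc]
            rw [htw, hdw]
            have hmem : ('\n' ∈ c :: rest) ↔ ('\n' ∈ rest) := by
              simp [List.mem_cons]
              intro hh
              exact absurd hh.symm hc
            by_cases hnr : '\n' ∈ rest <;> simp [hnr, hmem, List.append_assoc]

-- ===== VERDICT (by name: the statement is the Claim_ definition above) =====
theorem getDetailOtherValues_py_spec : Claim_equal_getDetailOtherValues_py := by
  intro dump _
  unfold Spec_getDetailOtherValues_py getDetailOtherValues_py getDetailOtherValues_py_alt
  rw [splitOn_eq_mySplit _ _ (by simp)]
  simp only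
  have hfun : (fun (otherValues : List String) (categoryDump : List Char) =>
        let lineSplit := PySem.Chars.splitOn categoryDump [':', ':']
        if 1 < lineSplit.length ∧ lineSplit.headD [] ≠ [] then
          otherValues ++ [String.ofList (lineSplit.headD [])]
        else otherValues)
      = (fun (otherValues : List String) (categoryDump : List Char) =>
        let lineSplit := mySplit [':', ':'] categoryDump
        if 1 < lineSplit.length ∧ lineSplit.headD [] ≠ [] then
          otherValues ++ [String.ofList (lineSplit.headD [])]
        else otherValues) := by
    funext otherValues categoryDump
    rw [splitOn_eq_mySplit _ _ (by simp)]
  rw [hfun, foldA]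
  rw [pvScan_spec (dump.toList.length) dump.toList [] [] false (le_refl _) (by
    intro _
    unfold OkBuf
    intro hinf
    have := hinf.length_le
    simp at this)]
  rw [mySplit_nl dump.toList]
  simp only [outLines, List.flatMap_cons, List.nil_append]
  by_cases hnr : '\n' ∈ dump.toList <;> simp [hnr, outLines]
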